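-- pv_equiv track=rewrite | github.com/binh-vu/datatype-validator | datatype/datatype_enum.py | get_datatype_uri
-- ===== SOURCE A (Python) =====
-- def get_datatype_uri(data_type):
--     all_datatype = [
--         {
--             "label": "xsd:string",
--             "uri": "http://www.w3.org/2001/XMLSchema#string"
--         },
--         {
--             "label": "xsd:float",
--             "uri": "http://www.w3.org/2001/XMLSchema#float"
--         },
--         {
--             "label": "xsd:integer",
--             "uri": "http://www.w3.org/2001/XMLSchema#integer"
--         },
--         {
--             "label": "xsd:double",
--             "uri": "http://www.w3.org/2001/XMLSchema#double"
--         },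
--         {
--             "label": "xsd:date",
--             "uri": "http://www.w3.org/2001/XMLSchema#date"
--         },
--         {
--             "label": "xsd:boolean",
--             "uri": "http://www.w3.org/2001/XMLSchema#boolean"
--         },
--         {
--             "label": "xsd:anyURI",
--             "uri": "http://www.w3.org/2001/XMLSchema#anyURI"
--         }
--     ]
--
--     for current_type in all_datatype:
--         if current_type['label'] == data_type:
--             return current_type
-- ===== SOURCE B (Python) =====
-- _XSD_BASE = "http://www.w3.org/2001/XMLSchema#"
-- _XSD_SUFFIXES = {"string", "float", "integer", "double", "date", "boolean", "anyURI"}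
--
--
-- def get_datatype_uri(data_type):
--     # Closed form: every known URI is the XSD base plus the label's suffix after "xsd:".
--     if isinstance(data_type, str) and data_type.startswith("xsd:"):
--         suffix = data_type[4:]
--         if suffix in _XSD_SUFFIXES:
--             return {"label": data_type, "uri": _XSD_BASE + suffix}
-- ===== Notes on version B (the rewrite author's own statement) =====
-- stated objective: idiomatic
-- what changed: Replaces the linear scan over a literal table of dicts by a closed-form computation: strip the label prefix, test the suffix against a small set, and construct the result dict as XSD base URI + suffix.
import Mathlib
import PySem

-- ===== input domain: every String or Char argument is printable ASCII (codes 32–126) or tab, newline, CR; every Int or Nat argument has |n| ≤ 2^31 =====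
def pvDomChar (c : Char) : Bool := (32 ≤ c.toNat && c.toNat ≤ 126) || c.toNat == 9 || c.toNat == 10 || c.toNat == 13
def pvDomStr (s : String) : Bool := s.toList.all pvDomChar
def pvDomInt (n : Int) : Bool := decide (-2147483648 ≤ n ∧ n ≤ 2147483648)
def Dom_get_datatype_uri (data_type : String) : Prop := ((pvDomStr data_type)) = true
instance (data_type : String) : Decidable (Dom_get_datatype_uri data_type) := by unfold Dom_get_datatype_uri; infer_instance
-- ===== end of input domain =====

-- B replaces A's linear scan of a literal table by a closed-form computation of the
-- URI from the label (prefix check + suffix in a small set); objective: idiomatic.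

-- ===== PORT A =====
def pvAllDatatype : List (List (String × String)) :=
  [ [("label", "xsd:string"),  ("uri", "http://www.w3.org/2001/XMLSchema#string")]
  , [("label", "xsd:float"),   ("uri", "http://www.w3.org/2001/XMLSchema#float")]
  , [("label", "xsd:integer"), ("uri", "http://www.w3.org/2001/XMLSchema#integer")]
  , [("label", "xsd:double"),  ("uri", "http://www.w3.org/2001/XMLSchema#double")]
  , [("label", "xsd:date"),    ("uri", "http://www.w3.org/2001/XMLSchema#date")]
  , [("label", "xsd:boolean"), ("uri", "http://www.w3.org/2001/XMLSchema#boolean")]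
  , [("label", "xsd:anyURI"),  ("uri", "http://www.w3.org/2001/XMLSchema#anyURI")] ]

-- the 'for current_type in all_datatype' loop with its early return
def pvScan (data_type : String) : List (List (String × String)) → Option (List (String × String))
  | [] => none
  | d :: rest =>
      if (PySem.Dict.mk d).get? "label" = some data_type then some d
      else pvScan data_type rest

def get_datatype_uri (data_type : String) : Option (List (String × String)) :=
  pvScan data_type pvAllDatatype

-- ===== PORT B =====
def pvXsdBase : String := "http://www.w3.org/2001/XMLSchema#"
def pvXsdSuffixes : List String := ["string", "float", "integer", "double", "date", "boolean", "anyURI"]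

def get_datatype_uri_alt (data_type : String) : Option (List (String × String)) :=
  if PySem.Str.startswith data_type "xsd:" then
    let suffix := PySem.Str.slice data_type (some 4) none
    if pvXsdSuffixes.contains suffix then
      some [("label", data_type), ("uri", pvXsdBase ++ suffix)]
    else none
  else none

-- ===== PRECONDITION & SPEC =====
def Spec_get_datatype_uri (data_type : String) (out : Option (List (String × String))) : Prop := out = get_datatype_uri_alt data_type
instance (data_type : String) (out : Option (List (String × String))) : Decidable (Spec_get_datatype_uri data_type out) := by unfold Spec_get_datatype_uri; infer_instance

-- ===== CLAIM (what is proved, stated in full; the proofs are below) =====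
def Claim_equal_get_datatype_uri : Prop := ∀ (data_type : String), Dom_get_datatype_uri data_type → Spec_get_datatype_uri data_type (get_datatype_uri data_type)

-- ===== LEMMAS AND PROOFS =====

-- a string starting with "xsd:" is "xsd:" followed by its [4:] slice
lemma pv_split (s : String) (h : PySem.Str.startswith s "xsd:" = true) :
    s = "xsd:" ++ PySem.Str.slice s (some 4) none := by
  have hp : "xsd:".toList <+: s.toList := by
    rw [← PySem.Chars.startswith_iff]
    simpa using h
  obtain ⟨r, hr⟩ := hp
  have hs : PySem.Str.slice s (some 4) none = String.ofList r := by
    unfold PySem.Str.slice PySem.Chars.slice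
    rw [show ((4:Int)) = ((4:Nat):Int) by norm_num, PySem.List.slice_from_natCast]
    rw [← hr]
    rfl
  rw [hs]
  apply String.ext
  simpa using hr.symm

theorem get_datatype_uri_spec : Claim_equal_get_datatype_uri := by
  intro s _
  unfold Spec_get_datatype_uri
  by_cases h1 : s = "xsd:string";  · subst h1; decide
  by_cases h2 : s = "xsd:float";   · subst h2; decide
  by_cases h3 : s = "xsd:integer"; · subst h3; decide
  by_cases h4 : s = "xsd:double";  · subst h4; decide
  by_cases h5 : s = "xsd:date";    · subst h5; decide
  by_cases h6 : s = "xsd:boolean"; · subst h6; decide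
  by_cases h7 : s = "xsd:anyURI";  · subst h7; decide
  have g1 : "xsd:string" ≠ s := fun h => h1 h.symm
  have g2 : "xsd:float" ≠ s := fun h => h2 h.symm
  have g3 : "xsd:integer" ≠ s := fun h => h3 h.symm
  have g4 : "xsd:double" ≠ s := fun h => h4 h.symm
  have g5 : "xsd:date" ≠ s := fun h => h5 h.symm
  have g6 : "xsd:boolean" ≠ s := fun h => h6 h.symm
  have g7 : "xsd:anyURI" ≠ s := fun h => h7 h.symm
  have hA : get_datatype_uri s = none := by
    simp [get_datatype_uri, pvScan, pvAllDatatype, PySem.Dict.get?_mk_cons,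
      g1, g2, g3, g4, g5, g6, g7]
  have hB : get_datatype_uri_alt s = none := by
    by_cases hb : PySem.Str.startswith s "xsd:"
    · have hsplit := pv_split s hb
      have n1 : PySem.Str.slice s (some 4) none ≠ "string" := fun e => h1 (by rw [hsplit, e]; rfl)
      have n2 : PySem.Str.slice s (some 4) none ≠ "float" := fun e => h2 (by rw [hsplit, e]; rfl)
      have n3 : PySem.Str.slice s (some 4) none ≠ "integer" := fun e => h3 (by rw [hsplit, e]; rfl)
      have n4 : PySem.Str.slice s (some 4) none ≠ "double" := fun e => h4 (by rw [hsplit, e]; rfl)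
      have n5 : PySem.Str.slice s (some 4) none ≠ "date" := fun e => h5 (by rw [hsplit, e]; rfl)
      have n6 : PySem.Str.slice s (some 4) none ≠ "boolean" := fun e => h6 (by rw [hsplit, e]; rfl)
      have n7 : PySem.Str.slice s (some 4) none ≠ "anyURI" := fun e => h7 (by rw [hsplit, e]; rfl)
      simp [get_datatype_uri_alt, pvXsdSuffixes, n1, n2, n3, n4, n5, n6, n7]
    · simp only [get_datatype_uri_alt]
      rw [if_neg (by simpa using hb)]
  rw [hA, hB]
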